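-- pv_equiv track=rewrite | github.com/3pacs/OCDR | app/services/bank_importer.py | _map_csv_columns
-- ===== SOURCE A (Python) =====
-- _CSV_COL_ALIASES = {
--     "transaction_date": ["date", "transaction date", "trans date", "posted date", "trans. date"],
--     "post_date":        ["post date", "posting date", "settlement date"],
--     "description":      ["description", "memo", "narrative", "transaction description",
--                          "details", "payee", "merchant"],
--     "amount":           ["amount", "transaction amount", "debit/credit", "net amount"],
--     "debit":            ["debit", "withdrawals", "charges", "amount (dr)"],
--     "credit":           ["credit", "deposits", "payments", "amount (cr)"],
--     "balance":          ["balance", "running balance", "balance after"],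
--     "check_number":     ["check number", "check #", "chk #", "check no"],
--     "reference":        ["reference", "reference number", "ref #", "transaction id"],
-- }
--
-- def _map_csv_columns(headers: list[str]) -> dict[str, str | None]:
--     """Return {field_name: actual_header} for each known field."""
--     lower_headers = [h.lower() for h in headers]
--     result = {}
--     for field, aliases in _CSV_COL_ALIASES.items():
--         for alias in aliases:
--             if alias in lower_headers:
--                 result[field] = headers[lower_headers.index(alias)]
--                 break
--         else:
--             result[field] = None
--     return result
-- ===== SOURCE B (Python) =====
-- _CSV_COL_ALIASES = {
--     "transaction_date": ["date", "transaction date", "trans date", "posted date", "trans. date"],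
--     "post_date":        ["post date", "posting date", "settlement date"],
--     "description":      ["description", "memo", "narrative", "transaction description",
--                          "details", "payee", "merchant"],
--     "amount":           ["amount", "transaction amount", "debit/credit", "net amount"],
--     "debit":            ["debit", "withdrawals", "charges", "amount (dr)"],
--     "credit":           ["credit", "deposits", "payments", "amount (cr)"],
--     "balance":          ["balance", "running balance", "balance after"],
--     "check_number":     ["check number", "check #", "chk #", "check no"],
--     "reference":        ["reference", "reference number", "ref #", "transaction id"],
-- }
--
-- def _map_csv_columns(headers: list[str]) -> dict[str, str | None]:
--     """Return {field_name: actual_header} for each known field."""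
--     result = {}
--     for field, aliases in _CSV_COL_ALIASES.items():
--         rank = {a: i for i, a in enumerate(aliases)}
--         best = None  # (alias_rank, header): lowest rank wins, first occurrence kept
--         for h in headers:
--             r = rank.get(h.lower())
--             if r is not None and (best is None or r < best[0]):
--                 best = (r, h)
--         result[field] = None if best is None else best[1]
--     return result
-- ===== Notes on version B (the rewrite author's own statement) =====
-- stated objective: alternative
-- what changed: Per field, A scans the alias list and for each alias does a membership test plus a .index rescan of the lowered headers; B instead prebuilds an alias->rank dictionary and makes a single pass over the headers, keeping the lowest-rank, first-seen header.
import Mathlib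
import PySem

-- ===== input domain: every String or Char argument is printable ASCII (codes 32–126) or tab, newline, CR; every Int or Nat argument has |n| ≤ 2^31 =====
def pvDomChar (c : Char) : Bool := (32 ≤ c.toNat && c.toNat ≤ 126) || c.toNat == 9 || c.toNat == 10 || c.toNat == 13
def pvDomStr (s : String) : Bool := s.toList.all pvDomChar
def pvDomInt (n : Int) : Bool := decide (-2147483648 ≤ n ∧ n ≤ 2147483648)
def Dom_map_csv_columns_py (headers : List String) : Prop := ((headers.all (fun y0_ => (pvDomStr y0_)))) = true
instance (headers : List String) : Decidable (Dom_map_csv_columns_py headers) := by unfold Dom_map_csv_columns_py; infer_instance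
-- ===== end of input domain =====

-- B replaces A's per-alias membership test + .index rescans of the header list by, per field,
-- a single pass over the headers with a prebuilt alias→rank dictionary, keeping the lowest-rank,
-- first-seen header (objective: alternative algorithm, same result).

-- the module constant _CSV_COL_ALIASES (shared data of both ports)
def csvColAliases : List (String × List String) :=
  [ ("transaction_date", ["date", "transaction date", "trans date", "posted date", "trans. date"]),
    ("post_date",        ["post date", "posting date", "settlement date"]),
    ("description",      ["description", "memo", "narrative", "transaction description",
                          "details", "payee", "merchant"]),
    ("amount",           ["amount", "transaction amount", "debit/credit", "net amount"]),
    ("debit",            ["debit", "withdrawals", "charges", "amount (dr)"]),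
    ("credit",           ["credit", "deposits", "payments", "amount (cr)"]),
    ("balance",          ["balance", "running balance", "balance after"]),
    ("check_number",     ["check number", "check #", "chk #", "check no"]),
    ("reference",        ["reference", "reference number", "ref #", "transaction id"]) ]

-- ===== PORT A =====
-- inner 'for alias in aliases: … break / else:' loop of A
def aFindAlias (aliases lowerHeaders headers : List String) : Option String :=
  match aliases with
  | [] => none
  | a :: rest =>
    if lowerHeaders.contains a then
      (PySem.List.index? lowerHeaders a).bind (fun i => headers[i]?)
    else aFindAlias rest lowerHeaders headers

def map_csv_columns_py (headers : List String) : List (String × Option String) :=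
  let lowerHeaders := headers.map PySem.Str.lower
  (csvColAliases.foldl
    (fun (d : PySem.Dict String (Option String)) fa =>
      d.insert fa.1 (aFindAlias fa.2 lowerHeaders headers))
    PySem.Dict.empty).items

-- ===== PORT B =====
-- rank = {a: i for i, a in enumerate(aliases)}
def bRank (aliases : List String) : PySem.Dict String Int :=
  (PySem.List.enumerate aliases).foldl (fun d p => d.insert p.2 p.1) PySem.Dict.empty

-- 'for h in headers: …' with best = None | (alias_rank, header)
-- 'r is not None and (best is None or r < best[0])' — the replacement test of B's loop
def bTake (r : Int) (best : Option (Int × String)) : Bool :=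
  match best with | none => true | some p => decide (r < p.1)

def bScan (rank : PySem.Dict String Int) (best : Option (Int × String)) :
    List String → Option (Int × String)
  | [] => best
  | h :: t =>
    match rank.get? (PySem.Str.lower h) with
    | some r => if bTake r best then bScan rank (some (r, h)) t else bScan rank best t
    | none => bScan rank best t

def bBest (aliases headers : List String) : Option String :=
  (bScan (bRank aliases) none headers).map (·.2)

def map_csv_columns_py_alt (headers : List String) : List (String × Option String) :=
  (csvColAliases.foldl
    (fun (d : PySem.Dict String (Option String)) fa =>
      d.insert fa.1 (bBest fa.2 headers))
    PySem.Dict.empty).items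

-- ===== PRECONDITION & SPEC =====
def Spec_map_csv_columns_py (headers : List String) (out : List (String × Option String)) : Prop := out = map_csv_columns_py_alt headers
instance (headers : List String) (out : List (String × Option String)) : Decidable (Spec_map_csv_columns_py headers out) := by unfold Spec_map_csv_columns_py; infer_instance

-- ===== CLAIM (what is proved, stated in full; the proofs are below) =====
def Claim_equal_map_csv_columns_py : Prop := ∀ (headers : List String), Dom_map_csv_columns_py headers → Spec_map_csv_columns_py headers (map_csv_columns_py headers)

-- ===== LEMMAS AND PROOFS =====

-- common normal form of the per-field value: first alias (in list order) that some header
-- lowers to, represented by the first such header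
def fSpec : List String → List String → Option String
  | [], _ => none
  | a :: rest, headers =>
    match headers.find? (fun h => PySem.Str.lower h == a) with
    | some h => some h
    | none => fSpec rest headers

-- ---- A-side ----
theorem index_bind_eq_find (headers : List String) (a : String) :
    (PySem.List.index? (headers.map PySem.Str.lower) a).bind (fun i => headers[i]?)
      = headers.find? (fun h => PySem.Str.lower h == a) := by
  induction headers with
  | nil => simp [PySem.List.index?]
  | cons h t ih =>
    by_cases hha : PySem.Str.lower h = a
    · rw [List.map_cons, hha, PySem.List.index?_cons_self]
      simp [List.find?, hha]
    · rw [List.map_cons, PySem.List.index?_cons_of_ne _ hha,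
        List.find?_cons_of_neg (by simp [hha]), ← ih]
      cases PySem.List.index? (t.map PySem.Str.lower) a <;> simp

theorem aFind_eq_fSpec (aliases headers : List String) :
    aFindAlias aliases (headers.map PySem.Str.lower) headers = fSpec aliases headers := by
  induction aliases with
  | nil => rfl
  | cons a rest ih =>
    rw [aFindAlias, fSpec]
    by_cases hc : a ∈ headers.map PySem.Str.lower
    · have hsome : (headers.find? (fun h => PySem.Str.lower h == a)).isSome := by
        obtain ⟨h, hh, hl⟩ := List.mem_map.mp hc
        exact List.find?_isSome.mpr ⟨h, hh, by simp [hl]⟩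
      obtain ⟨h0, hh0⟩ := Option.isSome_iff_exists.mp hsome
      rw [if_pos (by simpa using hc), index_bind_eq_find, hh0]
    · have hnone : headers.find? (fun h => PySem.Str.lower h == a) = none := by
        refine List.find?_eq_none.mpr (fun x hx => ?_)
        simp only [beq_iff_eq]
        exact fun hxa => hc (List.mem_map.mpr ⟨x, hx, hxa⟩)
      rw [if_neg (by simpa using hc), hnone, ih]

-- ---- B-side: the rank dictionary ----
def rankPairs (aliases : List String) (s : Int) : List (String × Int) :=
  (PySem.List.enumerate aliases s).map (fun p => (p.2, p.1))

theorem rankPairs_cons (a : String) (rest : List String) (s : Int) :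
    rankPairs (a :: rest) s = (a, s) :: rankPairs rest (s + 1) := by
  simp [rankPairs, PySem.List.enumerate_cons]

theorem bRank_eq (aliases : List String) (hnd : aliases.Nodup) :
    bRank aliases = PySem.Dict.mk (rankPairs aliases 0) := by
  apply PySem.Dict.ext
  rw [bRank, PySem.Dict.items_foldl_insert_fresh (PySem.List.enumerate aliases 0)
    Prod.snd Prod.fst PySem.Dict.empty (by intro p _; simp)
    (by rw [PySem.List.map_snd_enumerate]; exact hnd)]
  rfl

theorem get?_rankPairs_shift (aliases : List String) (s : Int) (x : String) :
    (PySem.Dict.mk (rankPairs aliases (s + 1))).get? x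
      = ((PySem.Dict.mk (rankPairs aliases s)).get? x).map (· + 1) := by
  induction aliases generalizing s with
  | nil => simp [rankPairs, PySem.List.enumerate_nil, PySem.Dict.get?]
  | cons a rest ih =>
    rw [rankPairs_cons, rankPairs_cons, PySem.Dict.get?_mk_cons, PySem.Dict.get?_mk_cons]
    by_cases hax : a = x
    · simp [hax]
    · simp only [beq_iff_eq, hax, if_false]
      exact ih (s + 1)

theorem get?_rankPairs_ge (aliases : List String) (s : Int) (x : String) (r : Int)
    (h : (PySem.Dict.mk (rankPairs aliases s)).get? x = some r) : s ≤ r := by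
  induction aliases generalizing s with
  | nil => simp [rankPairs, PySem.List.enumerate_nil, PySem.Dict.get?] at h
  | cons a rest ih =>
    rw [rankPairs_cons, PySem.Dict.get?_mk_cons] at h
    by_cases hax : a = x
    · simp [hax] at h; omega
    · simp only [beq_iff_eq, hax, if_false] at h
      have := ih (s + 1) h
      omega

-- ---- B-side: the header scan ----
theorem bScan_none (rank : PySem.Dict String Int)
    (h0 : ∀ x, rank.get? x = none) (hs : List String) (best : Option (Int × String)) :
    bScan rank best hs = best := by
  induction hs with
  | nil => rfl
  | cons h t ih => rw [bScan, h0]; exact ih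

theorem bScan_zero_absorb (rank : PySem.Dict String Int)
    (hnn : ∀ x r, rank.get? x = some r → 0 ≤ r) (w : String) (hs : List String) :
    bScan rank (some (0, w)) hs = some (0, w) := by
  induction hs with
  | nil => rfl
  | cons h t ih =>
    cases hr : rank.get? (PySem.Str.lower h) with
    | none => simp only [bScan, hr]; exact ih
    | some r =>
      have hd : bTake r (some (0, w)) = false := by
        have := hnn _ _ hr
        simp only [bTake, decide_eq_false_iff_not]
        omega
      simp only [bScan, hr, hd, Bool.false_eq_true, if_false]
      exact ih

theorem bScan_found (rank : PySem.Dict String Int)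
    (hnn : ∀ x r, rank.get? x = some r → 0 ≤ r) (a : String)
    (huniq : ∀ x, rank.get? x = some 0 → x = a) (ha : rank.get? a = some 0)
    (hs : List String) (h0 : String)
    (hf : hs.find? (fun h => PySem.Str.lower h == a) = some h0) :
    ∀ best : Option (Int × String),
      (best = none ∨ ∃ p, best = some p ∧ 0 < p.1) → bScan rank best hs = some (0, h0) := by
  induction hs with
  | nil => simp at hf
  | cons h t ih =>
    intro best hbest
    by_cases hha : PySem.Str.lower h = a
    · rw [List.find?_cons_of_pos (by simp [hha]), Option.some.injEq] at hf
      subst hf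
      have htake : bTake 0 best = true := by
        rcases hbest with hb | ⟨p, hb, hp⟩
        · subst hb; rfl
        · subst hb; simp [bTake, hp]
      have ha' : rank.get? (PySem.Str.lower h) = some 0 := by rw [hha]; exact ha
      simp only [bScan, ha', htake, if_true]
      exact bScan_zero_absorb rank hnn h t
    · rw [List.find?_cons_of_neg (by simp [hha])] at hf
      cases hr : rank.get? (PySem.Str.lower h) with
      | none => simp only [bScan, hr]; exact ih hf best hbest
      | some r =>
        have hrpos : 0 < r := by
          have h1 := hnn _ _ hr
          rcases lt_or_eq_of_le h1 with h2 | h2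
          · exact h2
          · exact absurd (huniq _ (h2 ▸ hr)) hha
        cases hbt : bTake r best with
        | true =>
          simp only [bScan, hr, hbt, if_true]
          exact ih hf _ (Or.inr ⟨(r, h), rfl, hrpos⟩)
        | false =>
          simp only [bScan, hr, hbt, Bool.false_eq_true, if_false]
          exact ih hf best hbest

theorem bScan_shift (rank1 rank2 : PySem.Dict String Int) :
    ∀ (hs : List String),
      (∀ h ∈ hs, rank1.get? (PySem.Str.lower h) = (rank2.get? (PySem.Str.lower h)).map (· + 1)) →
      ∀ best : Option (Int × String),
        bScan rank1 (best.map (fun p => (p.1 + 1, p.2))) hs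
          = (bScan rank2 best hs).map (fun p => (p.1 + 1, p.2)) := by
  intro hs
  induction hs with
  | nil => intro _ best; rfl
  | cons h t ih =>
    intro hsh best
    have hh := hsh h (List.mem_cons_self ..)
    cases hr : rank2.get? (PySem.Str.lower h) with
    | none =>
      have hr1 : rank1.get? (PySem.Str.lower h) = none := by rw [hh, hr]; rfl
      simp only [bScan, hr, hr1]
      exact ih (fun x hx => hsh x (List.mem_cons_of_mem _ hx)) best
    | some r =>
      have hr1 : rank1.get? (PySem.Str.lower h) = some (r + 1) := by rw [hh, hr]; rfl
      have hcond : bTake (r + 1) (best.map (fun p => (p.1 + 1, p.2))) = bTake r best := by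
        cases best with
        | none => rfl
        | some p =>
          simp only [Option.map_some, bTake, decide_eq_decide]
          omega
      simp only [bScan, hr, hr1, hcond]
      cases hbt : bTake r best with
      | true =>
        simp only [if_true]
        have := ih (fun x hx => hsh x (List.mem_cons_of_mem _ hx)) (some (r, h))
        simpa using this
      | false =>
        simp only [Bool.false_eq_true, if_false]
        exact ih (fun x hx => hsh x (List.mem_cons_of_mem _ hx)) best

theorem bBest_eq_fSpec (aliases : List String) (hnd : aliases.Nodup) (headers : List String) :
    bBest aliases headers = fSpec aliases headers := by
  induction aliases generalizing headers with
  | nil =>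
    rw [bBest, bScan_none _ (fun x => by
      simp [bRank, PySem.List.enumerate_nil, PySem.Dict.get?_empty])]
    rfl
  | cons a rest ih =>
    obtain ⟨hna, hndr⟩ := List.nodup_cons.mp hnd
    have hR : bRank (a :: rest) = PySem.Dict.mk (rankPairs (a :: rest) 0) := bRank_eq _ hnd
    have hF1 : (bRank (a :: rest)).get? a = some 0 := by
      rw [hR, rankPairs_cons, PySem.Dict.get?_mk_cons]; simp
    have hF2 : ∀ x, x ≠ a →
        (bRank (a :: rest)).get? x = ((bRank rest).get? x).map (· + 1) := by
      intro x hxa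
      rw [hR, rankPairs_cons, PySem.Dict.get?_mk_cons, bRank_eq rest hndr]
      simp only [beq_iff_eq, Ne.symm hxa, if_false]
      have := get?_rankPairs_shift rest 0 x
      simpa using this
    have hF3 : ∀ x r, (bRank (a :: rest)).get? x = some r → 0 ≤ r := by
      intro x r hx
      rw [hR] at hx
      exact get?_rankPairs_ge _ 0 x r hx
    have hF4 : ∀ x, (bRank (a :: rest)).get? x = some 0 → x = a := by
      intro x hx
      by_contra hxa
      rw [hF2 x hxa] at hx
      cases hy : (bRank rest).get? x with
      | none => rw [hy] at hx; simp at hx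
      | some r =>
        rw [bRank_eq rest hndr] at hy
        have := get?_rankPairs_ge rest 0 x r hy
        rw [bRank_eq rest hndr, hy] at hx
        simp only [Option.map_some, Option.some.injEq] at hx
        omega
    cases hfind : headers.find? (fun h => PySem.Str.lower h == a) with
    | some h0 =>
      rw [bBest, bScan_found _ hF3 a hF4 hF1 headers h0 hfind none (Or.inl rfl)]
      rw [fSpec, hfind]
      rfl
    | none =>
      have hnotin : ∀ h ∈ headers, PySem.Str.lower h ≠ a := by
        intro h hh
        have := List.find?_eq_none.mp hfind h hh
        simpa using this
      rw [fSpec, hfind, ← ih hndr headers, bBest, bBest]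
      have := bScan_shift (bRank (a :: rest)) (bRank rest) headers
        (fun h hh => hF2 _ (hnotin h hh)) none
      simp only [Option.map_none] at this
      rw [this]
      cases bScan (bRank rest) none headers <;> simp

-- ===== VERDICT (by name: the statement is the Claim_ definition above) =====
theorem map_csv_columns_py_spec : Claim_equal_map_csv_columns_py := by
  intro headers _
  show map_csv_columns_py headers = map_csv_columns_py_alt headers
  simp only [map_csv_columns_py, map_csv_columns_py_alt, csvColAliases, List.foldl,
    aFind_eq_fSpec]
  rw [bBest_eq_fSpec ["date", "transaction date", "trans date", "posted date", "trans. date"] (by decide) headers,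
    bBest_eq_fSpec ["post date", "posting date", "settlement date"] (by decide) headers,
    bBest_eq_fSpec ["description", "memo", "narrative", "transaction description", "details", "payee", "merchant"] (by decide) headers,
    bBest_eq_fSpec ["amount", "transaction amount", "debit/credit", "net amount"] (by decide) headers,
    bBest_eq_fSpec ["debit", "withdrawals", "charges", "amount (dr)"] (by decide) headers,
    bBest_eq_fSpec ["credit", "deposits", "payments", "amount (cr)"] (by decide) headers,
    bBest_eq_fSpec ["balance", "running balance", "balance after"] (by decide) headers,
    bBest_eq_fSpec ["check number", "check #", "chk #", "check no"] (by decide) headers,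
    bBest_eq_fSpec ["reference", "reference number", "ref #", "transaction id"] (by decide) headers]
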